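-- pv_equiv track=rewrite | github.com/RenaGao/L2Moderator | moderation_analysis/processes/find_topics.py | get_shorten_index
-- ===== SOURCE A (Python) =====
-- def get_shorten_index(text):
--     shorten_index = len(text.split(" "))
--
--     index_comma = 0
--     indexes_comma = [i for i, c in enumerate(text) if c == ","]
--     for i in indexes_comma:
--         if len(text[:i].split(" ")) >= 10:
--             index_comma = i
--             break
--
--     before_co_str = text[:index_comma]
--     before_co_tk_count = len(before_co_str.split(" "))
--
--     index_stop = 0
--     indexes_stop = [i for i, c in enumerate(text) if c == "."]
--     for i in indexes_stop:
--         if len(text[:i].split(" ")) >= 10: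
--             index_stop = i
--             break
--
--     before_stp_str = text[:index_stop]
--     before_stp_tk_count = len(before_stp_str.split(" "))
--
--     max_tk_count = max(before_co_tk_count, before_stp_tk_count)
--     min_tk_count = min(before_co_tk_count, before_stp_tk_count)
--
--     if max_tk_count < 10:
--         shorten_index = 10
--     elif min_tk_count >= 10:
--         shorten_index = min_tk_count
--     else:
--         for c in [before_co_tk_count, before_stp_tk_count]:
--             if c >= 10:
--                 shorten_index = c
--
--     return " ".join(text.split(" ")[:shorten_index])
-- ===== SOURCE B (Python) =====
-- def get_shorten_index(text):
--     # One left-to-right pass: spaces counts ' ' seen so far, so the prefix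
--     # text[:i] splits into spaces+1 words.  Stop at the first ',' or '.'
--     # whose prefix already holds >= 10 words; default to 10 words.
--     spaces = 0
--     n = 10
--     for ch in text:
--         if (ch == "," or ch == ".") and spaces >= 9:
--             n = spaces + 1
--             break
--         if ch == " ":
--             spaces += 1
--     return " ".join(text.split(" ")[:n])
-- ===== Notes on version B (the rewrite author's own statement) =====
-- stated objective: faster
-- what changed: A re-splits the whole prefix text[:i] at every comma/period candidate and then reconciles two counts through a max/min/fold branch; B makes a single left-to-right pass keeping a running space count and stops at the first ',' or '.' whose prefix already holds >= 10 words.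
import Mathlib
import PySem

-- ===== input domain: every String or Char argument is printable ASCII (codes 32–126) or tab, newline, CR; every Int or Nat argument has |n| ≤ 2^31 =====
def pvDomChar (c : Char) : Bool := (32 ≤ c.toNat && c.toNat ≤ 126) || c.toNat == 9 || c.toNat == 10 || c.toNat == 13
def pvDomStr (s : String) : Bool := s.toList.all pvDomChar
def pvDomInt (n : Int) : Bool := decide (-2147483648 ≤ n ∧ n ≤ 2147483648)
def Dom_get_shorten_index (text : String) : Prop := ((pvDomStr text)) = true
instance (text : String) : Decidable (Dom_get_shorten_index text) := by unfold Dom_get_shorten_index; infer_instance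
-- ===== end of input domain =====

-- B replaces A's repeated prefix-splitting scans by one left-to-right pass over the characters
-- (objective: faster).

-- ===== PORT A =====
-- 'for i in indexes: if len(text[:i].split(" ")) >= 10: index = i; break' (index defaults to 0)
def gsA_loop (t : List Char) : List Int → Int
  | [] => 0
  | i :: rest =>
    if 10 ≤ (PySem.Chars.splitOn (PySem.List.slice t none (some i)) [' ']).length then i
    else gsA_loop t rest

def get_shorten_index (text : String) : String :=
  let t := text.toList
  let shorten_index := (PySem.Chars.splitOn t [' ']).length
  let indexes_comma := ((PySem.List.enumerate t).filter (fun p => p.2 == ',')).map (fun p => p.1)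
  let index_comma := gsA_loop t indexes_comma
  let before_co_str := PySem.List.slice t none (some index_comma)
  let before_co_tk_count := (PySem.Chars.splitOn before_co_str [' ']).length
  let indexes_stop := ((PySem.List.enumerate t).filter (fun p => p.2 == '.')).map (fun p => p.1)
  let index_stop := gsA_loop t indexes_stop
  let before_stp_str := PySem.List.slice t none (some index_stop)
  let before_stp_tk_count := (PySem.Chars.splitOn before_stp_str [' ']).length
  let max_tk_count := max before_co_tk_count before_stp_tk_count
  let min_tk_count := min before_co_tk_count before_stp_tk_count
  let shorten_index :=
    if max_tk_count < 10 then 10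
    else if 10 ≤ min_tk_count then min_tk_count
    else [before_co_tk_count, before_stp_tk_count].foldl
           (fun acc c => if 10 ≤ c then c else acc) shorten_index
  String.ofList (PySem.Chars.join [' ']
    (PySem.List.slice (PySem.Chars.splitOn t [' ']) none (some (shorten_index : Int))))

-- ===== PORT B =====
-- one pass: spaces = ' '-count of the prefix scanned so far; stop at the first ',' or '.'
-- whose prefix already holds >= 10 words; default 10
def gsB_loop : List Char → Nat → Nat
  | [], _ => 10
  | ch :: rest, spaces =>
    if (ch = ',' ∨ ch = '.') ∧ 9 ≤ spaces then spaces + 1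
    else gsB_loop rest (if ch = ' ' then spaces + 1 else spaces)

def get_shorten_index_alt (text : String) : String :=
  let t := text.toList
  let n := gsB_loop t 0
  String.ofList (PySem.Chars.join [' '] ((PySem.Chars.splitOn t [' ']).take n))

-- ===== PRECONDITION & SPEC =====
def Spec_get_shorten_index (text : String) (out : String) : Prop := out = get_shorten_index_alt text
instance (text : String) (out : String) : Decidable (Spec_get_shorten_index text out) := by unfold Spec_get_shorten_index; infer_instance

-- ===== CLAIM (what is proved, stated in full; the proofs are below) =====
def Claim_equal_get_shorten_index : Prop := ∀ (text : String), Dom_get_shorten_index text → Spec_get_shorten_index text (get_shorten_index text)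

-- ===== LEMMAS AND PROOFS =====

-- splitting on a single space yields (space count + 1) pieces
theorem gs_go_len (fuel : Nat) : ∀ (l cur : List Char) (acc : List (List Char)),
    l.length < fuel →
    (PySem.Chars.splitOn.go [' '] fuel l cur acc).length = acc.length + l.count ' ' + 1 := by
  induction fuel with
  | zero => intro l cur acc h; omega
  | succ f ih =>
    intro l cur acc h
    match l with
    | [] => simp [PySem.Chars.splitOn.go]
    | c :: rest =>
      by_cases hc : c = ' '
      · subst hc
        rw [show PySem.Chars.splitOn.go [' '] (f+1) (' ' :: rest) cur acc
            = PySem.Chars.splitOn.go [' '] f rest [] (cur.reverse :: acc) from by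
          simp [PySem.Chars.splitOn.go, List.isPrefixOf]]
        rw [ih rest [] _ (by simpa using Nat.lt_of_succ_lt_succ h)]
        simp; omega
      · rw [show PySem.Chars.splitOn.go [' '] (f+1) (c :: rest) cur acc
            = PySem.Chars.splitOn.go [' '] f rest (c :: cur) acc from by
          simp [PySem.Chars.splitOn.go, List.isPrefixOf, Ne.symm hc]]
        rw [ih rest (c :: cur) acc (by simpa using Nat.lt_of_succ_lt_succ h)]
        simp [hc]

theorem gs_splitOn_len (u : List Char) :
    (PySem.Chars.splitOn u [' ']).length = u.count ' ' + 1 := by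
  unfold PySem.Chars.splitOn
  simpa using gs_go_len (u.length + 1) u [] [] (by omega)

-- positions (front to back) of character c in a list
def gs_posns (c : Char) : List Char → List Nat
  | [] => []
  | d :: r => if d = c then 0 :: (gs_posns c r).map (· + 1) else (gs_posns c r).map (· + 1)

-- scan with the running space count sp: report sp+1 at the first character satisfying p
-- whose prefix holds ≥ 9 spaces (i.e. ≥ 10 words)
def gs_spc (p : Char → Prop) [DecidablePred p] : List Char → Nat → Option Nat
  | [], _ => none
  | d :: r, sp =>
    if p d ∧ 9 ≤ sp then some (sp + 1)
    else gs_spc p r (if d = ' ' then sp + 1 else sp)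

-- A's before-the-chosen-index word count, reduced to a scan over the position list
def gs_aCount (t : List Char) : List Nat → Nat
  | [] => 1
  | i :: rest =>
    if 9 ≤ (t.take i).count ' ' then (t.take i).count ' ' + 1 else gs_aCount t rest

def gs_omin : Option Nat → Option Nat → Option Nat
  | none, b => b
  | a, none => a
  | some x, some y => some (min x y)

theorem gs_enum_filter (u : List Char) (c : Char) : ∀ (s : Int),
    ((PySem.List.enumerate u s).filter (fun p => p.2 == c)).map (fun p => p.1)
      = (gs_posns c u).map (fun n => s + Int.ofNat n) := by
  induction u with
  | nil => intro s; simp [PySem.List.enumerate, gs_posns]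
  | cons d r ih =>
    intro s
    by_cases hd : d = c
    · subst hd
      simp only [PySem.List.enumerate, gs_posns, List.filter_cons, BEq.rfl,
        List.map_cons, List.map_map, if_pos]
      rw [ih (s + 1)]
      refine List.cons_eq_cons.mpr ⟨by simp, ?_⟩
      apply List.map_congr_left; intro n _; simp [Function.comp, Int.ofNat_eq_natCast]; omega
    · simp only [PySem.List.enumerate, gs_posns, if_neg hd, List.filter_cons]
      rw [if_neg (by simp [hd]), ih (s + 1), List.map_map]
      apply List.map_congr_left; intro n _; simp [Function.comp, Int.ofNat_eq_natCast]; omega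

theorem gs_loop_aCount (t : List Char) : ∀ (l : List Nat),
    (PySem.Chars.splitOn
        (PySem.List.slice t none (some (gsA_loop t (l.map Int.ofNat)))) [' ']).length
      = gs_aCount t l := by
  intro l
  induction l with
  | nil =>
    rw [show gsA_loop t (([] : List Nat).map Int.ofNat) = 0 from rfl]
    rw [PySem.List.slice_to t (le_refl (0 : Int))]
    simp [gs_aCount, gs_splitOn_len]
  | cons i rest ih =>
    have hsl : PySem.List.slice t none (some (Int.ofNat i)) = t.take i := by
      rw [PySem.List.slice_to t (by exact Int.natCast_nonneg i)]; simp
    rw [List.map_cons, show gsA_loop t (Int.ofNat i :: rest.map Int.ofNat)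
        = if 10 ≤ (PySem.Chars.splitOn (PySem.List.slice t none (some (Int.ofNat i))) [' ']).length
          then Int.ofNat i else gsA_loop t (rest.map Int.ofNat) from rfl]
    simp only [gs_splitOn_len, hsl]
    by_cases h : 9 ≤ (t.take i).count ' '
    · rw [if_pos (by omega), hsl, gs_aCount, if_pos h]
    · rw [if_neg (by omega), gs_aCount, if_neg h]
      rw [gs_splitOn_len] at ih
      exact ih

theorem gs_aCount_spc (u : List Char) (c : Char) : ∀ (pre : List Char),
    gs_aCount (pre ++ u) ((gs_posns c u).map (· + pre.length))
      = (gs_spc (· = c) u (pre.count ' ')).getD 1 := by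
  induction u with
  | nil => intro pre; simp [gs_posns, gs_aCount, gs_spc]
  | cons d r ih =>
    intro pre
    have hpre : ((pre ++ d :: r).take pre.length).count ' ' = pre.count ' ' := by
      rw [List.take_left]
    have hshift : ((gs_posns c r).map (· + 1)).map (· + pre.length)
        = (gs_posns c r).map (· + (pre ++ [d]).length) := by
      rw [List.map_map]; apply List.map_congr_left; intro n _; simp; omega
    have happ : pre ++ d :: r = (pre ++ [d]) ++ r := by simp
    have hcnt : (pre ++ [d]).count ' ' = if d = ' ' then pre.count ' ' + 1 else pre.count ' ' := by
      by_cases hd : d = ' ' <;> simp [List.count_append, hd]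
    by_cases hd : d = c
    · subst hd
      simp only [gs_posns, if_true, true_and, List.map_cons, Nat.zero_add,
        gs_aCount, hpre, gs_spc]
      by_cases h9 : 9 ≤ pre.count ' '
      · rw [if_pos h9, if_pos h9]; simp
      · rw [if_neg h9, if_neg h9, hshift, happ, ih (pre ++ [d]), hcnt]
    · simp only [gs_posns, if_neg hd, gs_spc]
      rw [if_neg (by tauto), hshift, happ, ih (pre ++ [d]), hcnt]

theorem gs_spc_lb (p : Char → Prop) [DecidablePred p] (u : List Char) :
    ∀ (sp v : Nat), gs_spc p u sp = some v → sp + 1 ≤ v := by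
  induction u with
  | nil => intro sp v h; simp [gs_spc] at h
  | cons d r ih =>
    intro sp v h
    simp only [gs_spc] at h
    split_ifs at h with hc hd
    · simp only [Option.some.injEq] at h; omega
    · have := ih _ _ h; omega
    · have := ih _ _ h; omega

theorem gs_spc_ge10 (p : Char → Prop) [DecidablePred p] (u : List Char) :
    ∀ (sp v : Nat), gs_spc p u sp = some v → 10 ≤ v := by
  induction u with
  | nil => intro sp v h; simp [gs_spc] at h
  | cons d r ih =>
    intro sp v h
    simp only [gs_spc] at h
    split_ifs at h with hc hd
    · simp only [Option.some.injEq] at h; omega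
    · exact ih _ _ h
    · exact ih _ _ h

theorem gs_spc_merge (u : List Char) : ∀ (sp : Nat),
    gs_spc (fun d => d = ',' ∨ d = '.') u sp
      = gs_omin (gs_spc (fun d => d = ',') u sp) (gs_spc (fun d => d = '.') u sp) := by
  induction u with
  | nil => intro sp; rfl
  | cons d r ih =>
    intro sp
    show (if (d = ',' ∨ d = '.') ∧ 9 ≤ sp then some (sp + 1)
          else gs_spc (fun d => d = ',' ∨ d = '.') r (if d = ' ' then sp + 1 else sp))
        = gs_omin
            (if d = ',' ∧ 9 ≤ sp then some (sp + 1)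
             else gs_spc (fun d => d = ',') r (if d = ' ' then sp + 1 else sp))
            (if d = '.' ∧ 9 ≤ sp then some (sp + 1)
             else gs_spc (fun d => d = '.') r (if d = ' ' then sp + 1 else sp))
    by_cases h9 : 9 ≤ sp
    · by_cases hc : d = ','
      · subst hc
        rw [if_pos (show ((',' : Char) = ',' ∨ (',' : Char) = '.') ∧ 9 ≤ sp from ⟨Or.inl rfl, h9⟩),
          if_pos (show (',' : Char) = ',' ∧ 9 ≤ sp from ⟨rfl, h9⟩),
          if_neg (show ¬((',' : Char) = '.' ∧ 9 ≤ sp) from fun h => absurd h.1 (by decide)),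
          if_neg (by decide : ¬((',' : Char) = ' '))]
        cases hh : gs_spc (fun d => d = '.') r sp with
        | none => rfl
        | some v =>
          have hlb := gs_spc_lb (fun d => d = '.') r sp v hh
          show some (sp + 1) = some (min (sp + 1) v)
          rw [min_eq_left (by omega)]
      · by_cases hs : d = '.'
        · subst hs
          rw [if_pos (show (('.' : Char) = ',' ∨ ('.' : Char) = '.') ∧ 9 ≤ sp from ⟨Or.inr rfl, h9⟩),
            if_neg (show ¬(('.' : Char) = ',' ∧ 9 ≤ sp) from fun h => absurd h.1 (by decide)),
            if_pos (show ('.' : Char) = '.' ∧ 9 ≤ sp from ⟨rfl, h9⟩),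
            if_neg (by decide : ¬(('.' : Char) = ' '))]
          cases hh : gs_spc (fun d => d = ',') r sp with
          | none => rfl
          | some v =>
            have hlb := gs_spc_lb (fun d => d = ',') r sp v hh
            show some (sp + 1) = some (min v (sp + 1))
            rw [min_eq_right (by omega : sp + 1 ≤ v)]
        · rw [if_neg (show ¬((d = ',' ∨ d = '.') ∧ 9 ≤ sp) by tauto),
            if_neg (show ¬(d = ',' ∧ 9 ≤ sp) by tauto),
            if_neg (show ¬(d = '.' ∧ 9 ≤ sp) by tauto), ih]
    · rw [if_neg (show ¬((d = ',' ∨ d = '.') ∧ 9 ≤ sp) by tauto),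
        if_neg (show ¬(d = ',' ∧ 9 ≤ sp) by tauto),
        if_neg (show ¬(d = '.' ∧ 9 ≤ sp) by tauto), ih]

theorem gs_B_loop_spc (u : List Char) : ∀ (sp : Nat),
    gsB_loop u sp = (gs_spc (fun d => d = ',' ∨ d = '.') u sp).getD 10 := by
  induction u with
  | nil => intro sp; rfl
  | cons d r ih =>
    intro sp
    show (if (d = ',' ∨ d = '.') ∧ 9 ≤ sp then sp + 1
          else gsB_loop r (if d = ' ' then sp + 1 else sp))
        = ((if (d = ',' ∨ d = '.') ∧ 9 ≤ sp then some (sp + 1)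
          else gs_spc (fun d => d = ',' ∨ d = '.') r (if d = ' ' then sp + 1 else sp)).getD 10)
    split_ifs with hc
    · rfl
    · exact ih _
    · exact ih _

theorem get_shorten_index_eq (text : String) :
    get_shorten_index text = get_shorten_index_alt text := by
  unfold get_shorten_index get_shorten_index_alt
  set t := text.toList with ht
  have hmap : ∀ c : Char,
      ((PySem.List.enumerate t).filter (fun p => p.2 == c)).map (fun p => p.1)
        = (gs_posns c t).map Int.ofNat := by
    intro c
    rw [gs_enum_filter t c 0]
    apply List.map_congr_left; intro n _; simp
  have hA : ∀ c : Char,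
      (PySem.Chars.splitOn (PySem.List.slice t none
          (some (gsA_loop t (((PySem.List.enumerate t).filter (fun p => p.2 == c)).map
            (fun p => p.1))))) [' ']).length
        = (gs_spc (fun d => d = c) t 0).getD 1 := by
    intro c
    rw [hmap c, gs_loop_aCount t]
    have h0 := gs_aCount_spc t c []
    simpa using h0
  have hslp : ∀ (xs : List (List Char)) (n : Nat),
      PySem.List.slice xs none (some (n : Int)) = xs.take n := by
    intro xs n
    rw [PySem.List.slice_to xs (by positivity)]; simp
  simp only [hA ',', hA '.', gs_B_loop_spc t 0, gs_spc_merge t 0]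
  have h10c := gs_spc_ge10 (fun d => d = ',') t 0
  have h10s := gs_spc_ge10 (fun d => d = '.') t 0
  cases hc : gs_spc (fun d => d = ',') t 0 with
  | none =>
    cases hs : gs_spc (fun d => d = '.') t 0 with
    | none =>
      simp only [gs_omin, Option.getD_none]
      rw [if_pos (by norm_num), hslp]
    | some w =>
      have hw := h10s w hs
      simp only [gs_omin, Option.getD_some, Option.getD_none]
      rw [if_neg (show ¬ max 1 w < 10 by omega), if_neg (show ¬ 10 ≤ min 1 w by omega)]
      simp only [List.foldl]
      rw [if_pos (show 10 ≤ w by omega), hslp]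
  | some v =>
    have hv := h10c v hc
    cases hs : gs_spc (fun d => d = '.') t 0 with
    | none =>
      simp only [gs_omin, Option.getD_some, Option.getD_none]
      rw [if_neg (show ¬ max v 1 < 10 by omega), if_neg (show ¬ 10 ≤ min v 1 by omega)]
      simp only [List.foldl]
      rw [if_neg (show ¬ (10:Nat) ≤ 1 by omega), if_pos (show 10 ≤ v by omega), hslp]
    | some w =>
      have hw := h10s w hs
      simp only [gs_omin, Option.getD_some]
      rw [if_neg (show ¬ max v w < 10 by omega), if_pos (show 10 ≤ min v w by omega), hslp]

-- ===== VERDICT (by name: the statement is the Claim_ definition above) =====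
theorem get_shorten_index_spec : Claim_equal_get_shorten_index := by
  intro text _
  unfold Spec_get_shorten_index
  exact get_shorten_index_eq text
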